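-- pv_equiv track=rewrite | github.com/bilgehantekin/MedRAG-Core | backend/app/vision_router.py | normalize_ocr_errors
-- ===== SOURCE A (Python) =====
-- def normalize_ocr_errors(text: str) -> str:
--     """
--     Normalize common OCR errors.
--     """
--     # Common OCR confusions
--     replacements = {
--         '0': 'O',  # zero -> O
--         '1': 'I',  # one -> I
--         '|': 'I',  # pipe -> I
--         '!': 'I',  # exclamation -> I
--         '$': 'S',  # dollar -> S
--         '5': 'S',  # five -> S (sometimes)
--         '8': 'B',  # eight -> B
--         '@': 'A',  # at -> A
--         '3': 'E',  # three -> E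
--         '6': 'G',  # six -> G
--     }
--
--     result = text.upper()
--     for old, new in replacements.items():
--         result = result.replace(old, new)
--
--     return result
-- ===== SOURCE B (Python) =====
-- def normalize_ocr_errors(text: str) -> str:
--     """
--     Normalize common OCR errors.
--     """
--     # One explicit pass over the characters: uppercase each character and
--     # run it through an if/elif chain of the common OCR confusions
--     # (no replacement table, no full-string replace passes).
--     out = []
--     for ch in text:
--         c = ch.upper()
--         if c == '0':
--             c = 'O'
--         elif c == '1' or c == '|' or c == '!':
--             c = 'I'
--         elif c == '$' or c == '5':
--             c = 'S'
--         elif c == '8':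
--             c = 'B'
--         elif c == '@':
--             c = 'A'
--         elif c == '3':
--             c = 'E'
--         elif c == '6':
--             c = 'G'
--         out.append(c)
--     return ''.join(out)
-- ===== Notes on version B (the rewrite author's own statement) =====
-- stated objective: alternative
-- what changed: Drops the replacement dict and the ten full-string str.replace passes entirely: B makes one explicit pass over the characters, uppercasing each and mapping it through an if/elif chain into an accumulator list that is joined at the end; trades table-driven staged passes for a single explicit character loop.
import Mathlib
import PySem

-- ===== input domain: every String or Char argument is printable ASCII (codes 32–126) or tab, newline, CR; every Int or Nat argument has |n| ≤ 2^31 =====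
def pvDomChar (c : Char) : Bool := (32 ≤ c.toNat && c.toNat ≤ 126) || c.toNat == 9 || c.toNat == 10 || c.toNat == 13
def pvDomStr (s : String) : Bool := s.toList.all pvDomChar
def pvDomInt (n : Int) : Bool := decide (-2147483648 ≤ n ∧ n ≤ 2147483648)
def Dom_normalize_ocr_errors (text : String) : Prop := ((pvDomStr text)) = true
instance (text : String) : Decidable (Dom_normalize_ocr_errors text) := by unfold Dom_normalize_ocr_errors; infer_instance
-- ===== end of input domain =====

-- B drops the replacement dict and the ten full-string replace passes: one explicit pass over
-- the characters, each uppercased and mapped through an if/elif chain into an accumulator (alternative decomposition, same values).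

-- ===== PORT A =====
-- the dict literal `replacements` of A
def aReplacements : PySem.Dict String String :=
  PySem.Dict.ofList
    [("0", "O"), ("1", "I"), ("|", "I"), ("!", "I"), ("$", "S"),
     ("5", "S"), ("8", "B"), ("@", "A"), ("3", "E"), ("6", "G")]

def normalize_ocr_errors (text : String) : String :=
  -- result = text.upper(); for old, new in replacements.items(): result = result.replace(old, new)
  aReplacements.items.foldl (fun result p => PySem.Str.replace result p.1 p.2)
    (PySem.Str.upper text)

-- ===== PORT B =====
-- the if/elif chain on one (already-uppercased) character
def bFix (c : Char) : Char :=
  if c = '0' then 'O'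
  else if c = '1' ∨ c = '|' ∨ c = '!' then 'I'
  else if c = '$' ∨ c = '5' then 'S'
  else if c = '8' then 'B'
  else if c = '@' then 'A'
  else if c = '3' then 'E'
  else if c = '6' then 'G'
  else c

-- the `for ch in text` loop with its accumulator list `out` (ch.upper() = upperChar, exact on ASCII)
def bLoop : List Char → List Char → List Char
  | [], out => out.reverse
  | ch :: rest, out => bLoop rest (bFix (PySem.Chars.upperChar ch) :: out)

def normalize_ocr_errors_alt (text : String) : String :=
  String.ofList (bLoop text.toList [])

-- ===== PRECONDITION & SPEC =====
def Spec_normalize_ocr_errors (text : String) (out : String) : Prop := out = normalize_ocr_errors_alt text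
instance (text : String) (out : String) : Decidable (Spec_normalize_ocr_errors text out) := by unfold Spec_normalize_ocr_errors; infer_instance

-- ===== CLAIM (what is proved, stated in full; the proofs are below) =====
def Claim_equal_normalize_ocr_errors : Prop := ∀ (text : String), Dom_normalize_ocr_errors text → Spec_normalize_ocr_errors text (normalize_ocr_errors text)

-- ===== LEMMAS AND PROOFS =====

-- single-character replace is a per-character map
theorem go_single (o n : Char) : ∀ (l : List Char) (fuel : Nat) (acc : List Char), l.length ≤ fuel →
    PySem.Chars.replace.go [o] [n] fuel l acc = acc.reverse ++ l.map (fun c => if o = c then n else c) := by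
  intro l
  induction l with
  | nil => intro fuel acc _; cases fuel <;> simp [PySem.Chars.replace.go]
  | cons c t ih =>
    intro fuel acc hle
    cases fuel with
    | zero => simp at hle
    | succ f =>
      rw [PySem.Chars.replace.go]
      by_cases h : o = c
      · subst h
        simp [List.isPrefixOf, ih f (n :: acc) (by simpa using hle)]
      · simp [List.isPrefixOf, h, ih f (c :: acc) (by simpa using hle)]

theorem replace_single (s : List Char) (o n : Char) :
    PySem.Chars.replace s [o] [n] = s.map (fun c => if o = c then n else c) := by
  simpa [PySem.Chars.replace] using go_single o n s s.length [] le_rfl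

-- the per-character substitution realised by A's chain of replaces (in A's order)
def chainFn (c : Char) : Char :=
  let c := if '0' = c then 'O' else c
  let c := if '1' = c then 'I' else c
  let c := if '|' = c then 'I' else c
  let c := if '!' = c then 'I' else c
  let c := if '$' = c then 'S' else c
  let c := if '5' = c then 'S' else c
  let c := if '8' = c then 'B' else c
  let c := if '@' = c then 'A' else c
  let c := if '3' = c then 'E' else c
  if '6' = c then 'G' else c

-- A's side: the fold of ten single-char replaces is one map of chainFn
theorem portA_eq (text : String) :
    normalize_ocr_errors text = String.ofList ((PySem.Str.upper text).toList.map chainFn) := by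
  have hitems : aReplacements.items =
      [("0", "O"), ("1", "I"), ("|", "I"), ("!", "I"), ("$", "S"),
       ("5", "S"), ("8", "B"), ("@", "A"), ("3", "E"), ("6", "G")] := by decide
  unfold normalize_ocr_errors
  rw [hitems]
  simp only [List.foldl]
  simp [replace_single, PySem.Str.replace, Function.comp_def]
  congr 1

-- A's chained substitution and B's if/elif chain agree on every character
theorem chainFn_eq_bFix (c : Char) : chainFn c = bFix c := by
  by_cases h0 : c = '0'; · subst h0; decide
  by_cases h1 : c = '1'; · subst h1; decide
  by_cases h2 : c = '|'; · subst h2; decide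
  by_cases h3 : c = '!'; · subst h3; decide
  by_cases h4 : c = '$'; · subst h4; decide
  by_cases h5 : c = '5'; · subst h5; decide
  by_cases h6 : c = '8'; · subst h6; decide
  by_cases h7 : c = '@'; · subst h7; decide
  by_cases h8 : c = '3'; · subst h8; decide
  by_cases h9 : c = '6'; · subst h9; decide
  simp [chainFn, bFix, Ne.symm h0, Ne.symm h1, Ne.symm h2, Ne.symm h3, Ne.symm h4,
    Ne.symm h5, Ne.symm h6, Ne.symm h7, Ne.symm h8, Ne.symm h9,
    h0, h1, h2, h3, h4, h5, h6, h7, h8, h9]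

-- the accumulator loop is a map of bFix ∘ upperChar
theorem bLoop_eq (l : List Char) : ∀ (out : List Char),
    bLoop l out = out.reverse ++ l.map (fun ch => bFix (PySem.Chars.upperChar ch)) := by
  induction l with
  | nil => intro out; simp [bLoop]
  | cons ch rest ih => intro out; simp [bLoop, ih]

-- B's side as one map over the uppercased characters
theorem portB_eq (text : String) :
    normalize_ocr_errors_alt text = String.ofList ((PySem.Str.upper text).toList.map bFix) := by
  unfold normalize_ocr_errors_alt
  rw [bLoop_eq text.toList []]
  simp [PySem.Str.toList_upper, PySem.Chars.upper, List.map_map, Function.comp_def]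

-- ===== VERDICT (by name: the statement is the Claim_ definition above) =====
theorem normalize_ocr_errors_spec : Claim_equal_normalize_ocr_errors := by
  intro text _
  unfold Spec_normalize_ocr_errors
  rw [portA_eq, portB_eq, funext chainFn_eq_bFix]
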